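-- pv_equiv track=rewrite | github.com/dd2003-460/from-motivation-to-society | fix_syntax_errors.py | fix_unescaped_percent
-- ===== SOURCE A (Python) =====
-- def fix_unescaped_percent(lines):
--     """给行内的 % 添加转义（非注释行，且前面无转义）"""
--     new_lines = []
--     for line in lines:
--         if line.strip().startswith('%') or line.strip() == '':
--             new_lines.append(line)
--             continue
--         # 替换未转义的 % 为 \%
--         new_line = []
--         i = 0
--         while i < len(line):
--             if line[i] == '\\' and i+1 < len(line) and line[i+1] == '%':
--                 new_line.append(line[i:i+2])
--                 i += 2
--             elif line[i] == '%':
--                 new_line.append('\\%')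
--                 i += 1
--             else:
--                 new_line.append(line[i])
--                 i += 1
--         new_lines.append(''.join(new_line))
--     return new_lines
-- ===== SOURCE B (Python) =====
-- def fix_unescaped_percent(lines):
--     new_lines = []
--     for line in lines:
--         stripped = line.strip()
--         if stripped.startswith('%') or stripped == '':
--             new_lines.append(line)
--             continue
--         # single forward pass keeping only the previous character:
--         # escape a '%' exactly when the char before it is not a backslash
--         parts = []
--         prev = ''
--         for ch in line:
--             if ch == '%' and prev != '\\':
--                 parts.append('\\%')
--             else:
--                 parts.append(ch)
--             prev = ch
--         new_lines.append(''.join(parts))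
--     return new_lines
-- ===== Notes on version B (the rewrite author's own statement) =====
-- stated objective: simpler
-- what changed: Replaces A's index-based while loop with 2-char lookahead and slicing by a single forward pass that remembers only the previous character and escapes a % exactly when that character is not a backslash.
import Mathlib
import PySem

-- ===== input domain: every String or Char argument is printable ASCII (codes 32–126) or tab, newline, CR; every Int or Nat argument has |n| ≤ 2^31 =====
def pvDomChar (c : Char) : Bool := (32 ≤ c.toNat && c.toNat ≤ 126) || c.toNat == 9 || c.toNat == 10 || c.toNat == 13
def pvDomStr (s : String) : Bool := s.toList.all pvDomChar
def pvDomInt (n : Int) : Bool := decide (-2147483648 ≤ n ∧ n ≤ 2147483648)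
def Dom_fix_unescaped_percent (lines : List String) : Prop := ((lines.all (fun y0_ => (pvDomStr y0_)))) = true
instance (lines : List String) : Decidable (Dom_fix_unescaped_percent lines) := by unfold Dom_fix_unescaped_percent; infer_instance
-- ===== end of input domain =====

-- B replaces A's index/lookahead while loop by a one-pass fold that keeps only the previous
-- character; simpler, same cost. Equivalence over the whole domain (A is total).

-- ===== PORT A =====
-- the while loop over index i, transcribed as structural recursion on the remaining suffix
def aLoop : List Char → List Char
  | '\\' :: '%' :: rest => '\\' :: '%' :: aLoop rest
  | '%' :: rest => '\\' :: '%' :: aLoop rest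
  | c :: rest => c :: aLoop rest
  | [] => []

def fix_unescaped_percent (lines : List String) : List String :=
  lines.map (fun line =>
    if PySem.Str.startswith (PySem.Str.strip line) "%" ∨ PySem.Str.strip line = "" then line
    else String.ofList (aLoop line.toList))

-- ===== PORT B =====
-- B's inner for-loop: state = (emitted pieces flattened, previous character; none = initial '')
def bStep (st : List Char × Option Char) (ch : Char) : List Char × Option Char :=
  (st.1 ++ (if ch = '%' ∧ st.2 ≠ some '\\' then ['\\', '%'] else [ch]), some ch)

def fix_unescaped_percent_alt (lines : List String) : List String :=
  lines.map (fun line =>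
    if PySem.Str.startswith (PySem.Str.strip line) "%" ∨ PySem.Str.strip line = "" then line
    else String.ofList (line.toList.foldl bStep ([], none)).1)

-- ===== PRECONDITION & SPEC =====
def Spec_fix_unescaped_percent (lines : List String) (out : List String) : Prop := out = fix_unescaped_percent_alt lines
instance (lines : List String) (out : List String) : Decidable (Spec_fix_unescaped_percent lines out) := by unfold Spec_fix_unescaped_percent; infer_instance

-- ===== CLAIM (what is proved, stated in full; the proofs are below) =====
def Claim_equal_fix_unescaped_percent : Prop := ∀ (lines : List String), Dom_fix_unescaped_percent lines → Spec_fix_unescaped_percent lines (fix_unescaped_percent lines)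

-- ===== LEMMAS AND PROOFS =====

-- recursive form of B's scan
def bScan (prev : Option Char) : List Char → List Char
  | [] => []
  | c :: rest => (if c = '%' ∧ prev ≠ some '\\' then ['\\', '%'] else [c]) ++ bScan (some c) rest

theorem foldl_bStep_eq (cs : List Char) : ∀ (acc : List Char) (prev : Option Char),
    (cs.foldl bStep (acc, prev)).1 = acc ++ bScan prev cs := by
  induction cs with
  | nil => intro acc prev; simp [bScan]
  | cons c rest ih =>
      intro acc prev
      simp [bStep, bScan, ih, List.append_assoc]

theorem bScan_eq_aLoop : ∀ (cs : List Char) (prev : Option Char),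
    ¬ (prev = some '\\' ∧ cs.head? = some '%') → bScan prev cs = aLoop cs := by
  intro cs
  induction cs using aLoop.induct with
  | case1 rest ih =>
      intro prev h
      have hrec := ih (some '%') (by rintro ⟨h', _⟩; exact absurd h' (by decide))
      simp [bScan, aLoop, hrec]
  | case2 rest ih =>
      intro prev h
      have hp : prev ≠ some '\\' := fun hp => h ⟨hp, rfl⟩
      have hrec := ih (some '%') (by rintro ⟨h', _⟩; exact absurd h' (by decide))
      simp [bScan, aLoop, hrec, hp]
  | case3 c rest hne1 hne2 ih =>
      intro prev h
      have hc : c ≠ '%' := fun hc => hne2 hc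
      have hrec : bScan (some c) rest = aLoop rest := by
        apply ih
        rintro ⟨hcc, hh⟩
        have hc' : c = '\\' := Option.some.inj hcc
        cases rest with
        | nil => simp at hh
        | cons d r =>
            have hd : d = '%' := by simpa using hh
            exact hne1 r hc' (by rw [hd])
      have ha : aLoop (c :: rest) = c :: aLoop rest := aLoop.eq_3 c rest hne1 hne2
      simp [bScan, hc, hrec, ha]
  | case4 => intro prev _; rfl

-- ===== VERDICT (by name: the statement is the Claim_ definition above) =====
theorem fix_unescaped_percent_spec : Claim_equal_fix_unescaped_percent := by
  intro lines _
  unfold Spec_fix_unescaped_percent fix_unescaped_percent fix_unescaped_percent_alt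
  apply List.map_congr_left
  intro line _
  split_ifs with hc
  · rfl
  · rw [foldl_bStep_eq, List.nil_append, bScan_eq_aLoop]
    rintro ⟨h, _⟩
    simp at h
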